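-- pv_equiv track=rewrite | github.com/instreams/substring-index-mgrubent | indexer.py | descend
-- ===== SOURCE A (Python) =====
-- from typing import List, Set
--
-- def descend(string: str, i: int, word_set: Set[str], word_length: int):
--     # Handle our base case; if we're here we've used every word in the word list
--     # exactly once
--     if len(word_set) == 0:
--         return True
--
--     # Handle indexing errors
--     elif i >= len(string):
--         return False
--
--     # Continue to recurse
--     else:
--         # Bite off the next chunk of the given word.
--         #
--         # Unfortunately, in Python this instantiates a new string, rather
--         # than doing memory-clever referencing.
--         # https://stackoverflow.com/q/49122407/11280049
--         next_word = string[i:i + word_length]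
--
--         # At least we have constant lookup time for whether this new chunk is
--         # the next step in a valid substring.
--         if next_word in word_set:
--             # If we have a match:
--             # 1) Instantiate a new set without this word in it,
--             # 2) Advance the given index by the known word length, and
--             # 3) Continue to recurse
--             smaller_word_set = word_set - {next_word}
--             return descend(string, i + word_length, smaller_word_set, word_length)
--
--     # We didn't find a match
--     return False
-- ===== SOURCE B (Python) =====
-- def descend(string, i, word_set, word_length):
--     # Closed form: instead of recursing with a shrinking set, enumerate all k
--     # chunk start positions up front; succeed iff every start is in bounds and
--     # the k chunks are pairwise distinct members of word_set.
--     k = len(word_set)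
--     starts = [i + j * word_length for j in range(k)]
--     if any(s >= len(string) for s in starts):
--         return False
--     chunks = [string[s:s + word_length] for s in starts]
--     return len(set(chunks)) == k and all(c in word_set for c in chunks)
-- ===== Notes on version B (the rewrite author's own statement) =====
-- stated objective: alternative
-- what changed: Replaced the tail recursion over a shrinking set by a closed form: compute all k chunk start positions up front and check bounds, pairwise distinctness (via len(set(...))) and membership in word_set in one shot.
import Mathlib
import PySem

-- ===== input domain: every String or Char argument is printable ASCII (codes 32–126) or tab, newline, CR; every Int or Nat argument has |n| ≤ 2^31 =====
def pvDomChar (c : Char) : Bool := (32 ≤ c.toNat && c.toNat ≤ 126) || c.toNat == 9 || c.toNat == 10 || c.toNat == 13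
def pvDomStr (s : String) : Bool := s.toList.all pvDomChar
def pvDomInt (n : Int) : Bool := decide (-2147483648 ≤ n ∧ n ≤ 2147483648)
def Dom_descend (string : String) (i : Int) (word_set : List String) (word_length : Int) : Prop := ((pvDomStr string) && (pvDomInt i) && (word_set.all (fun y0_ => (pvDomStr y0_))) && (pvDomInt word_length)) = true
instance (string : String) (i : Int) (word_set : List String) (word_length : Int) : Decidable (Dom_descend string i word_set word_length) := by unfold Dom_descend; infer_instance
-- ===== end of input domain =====

-- B replaces A's tail recursion over a shrinking set by a closed form over all k chunk
-- start positions (bounds check + distinctness + membership); equivalence of return values.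

-- termination helper for port A: removing a present element shrinks the set
theorem pv_diff_singleton_length_lt (s : List String) (x : String) (h : x ∈ s) :
    (PySem.Set.diff s [x]).length < s.length := by
  simp only [PySem.Set.diff]
  apply List.length_filter_lt_length_iff_exists.mpr
  exact ⟨x, h, by simp⟩

-- ===== PORT A =====
def descend (string : String) (i : Int) (word_set : List String) (word_length : Int) : Bool :=
  if word_set.length = 0 then true
  else if i ≥ PySem.Str.len string then false
  else
    let next_word := PySem.Str.slice string (some i) (some (i + word_length))
    if PySem.Set.contains word_set next_word then
      descend string (i + word_length) (PySem.Set.diff word_set [next_word]) word_length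
    else false
termination_by word_set.length
decreasing_by
  exact pv_diff_singleton_length_lt word_set next_word ((PySem.Set.contains_iff word_set next_word).mp (by assumption))

-- ===== PORT B =====
def descend_alt (string : String) (i : Int) (word_set : List String) (word_length : Int) : Bool :=
  let k := word_set.length
  let starts := (PySem.List.pyRange 0 (k : Int) 1).map (fun j => i + j * word_length)
  if starts.any (fun st => decide (st ≥ PySem.Str.len string)) then false
  else
    let chunks := starts.map (fun st => PySem.Str.slice string (some st) (some (st + word_length)))
    decide ((PySem.Set.ofList chunks).length = k) && chunks.all (fun c => PySem.Set.contains word_set c)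

-- ===== PRECONDITION & SPEC =====
-- Pre_ excludes only lists with duplicate elements: the Python parameter is a set, so a
-- duplicate-carrying list encodes no Python input (A fed a raw duplicate list raises TypeError).
def Pre_descend (string : String) (i : Int) (word_set : List String) (word_length : Int) : Prop :=
  word_set.Nodup
instance (string : String) (i : Int) (word_set : List String) (word_length : Int) : Decidable (Pre_descend string i word_set word_length) := by unfold Pre_descend; infer_instance

def pvWitness_descend : String × Int × List String × Int := ("abba", 0, ["ab", "ba"], 2)

def Spec_descend (string : String) (i : Int) (word_set : List String) (word_length : Int) (out : Bool) : Prop := out = descend_alt string i word_set word_length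
instance (string : String) (i : Int) (word_set : List String) (word_length : Int) (out : Bool) : Decidable (Spec_descend string i word_set word_length out) := by unfold Spec_descend; infer_instance

-- ===== CLAIM (what is proved, stated in full; the proofs are below) =====
def Claim_equal_descend : Prop := ∀ (string : String) (i : Int) (word_set : List String) (word_length : Int), Dom_descend string i word_set word_length → Pre_descend string i word_set word_length → Spec_descend string i word_set word_length (descend string i word_set word_length)

-- ===== LEMMAS AND PROOFS =====

-- B's components, reshaped over a Nat range for induction
def pvChunks (s : String) (i wl : Int) (k : Nat) : List String :=
  (List.range k).map (fun (j : Nat) => PySem.Str.slice s (some (i + (j : Int) * wl)) (some (i + (j : Int) * wl + wl)))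

def pvBounds (s : String) (i wl : Int) (k : Nat) : Bool :=
  (List.range k).all (fun (j : Nat) => decide (i + (j : Int) * wl < PySem.Str.len s))

def pvGood (s : String) (i wl : Int) (ws : List String) : Prop :=
  pvBounds s i wl ws.length = true ∧ (pvChunks s i wl ws.length).Nodup ∧
    ∀ c ∈ pvChunks s i wl ws.length, c ∈ ws

theorem pv_ofList_sublist (xs : List String) : List.Sublist (PySem.Set.ofList xs) xs := by
  induction xs using List.reverseRecOn with
  | nil => exact List.Sublist.slnil
  | append_singleton t a ih =>
    rw [PySem.Set.ofList_append_singleton, PySem.Set.add_eq_ite]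
    split_ifs with h
    · exact ih.trans (List.sublist_append_left t [a])
    · exact List.Sublist.append ih (List.Sublist.refl [a])

theorem pv_ofList_length_eq_iff (xs : List String) :
    (PySem.Set.ofList xs).length = xs.length ↔ xs.Nodup := by
  constructor
  · intro h
    rw [← (pv_ofList_sublist xs).eq_of_length h]
    exact PySem.Set.nodup_ofList xs
  · intro h
    rw [PySem.Set.ofList_eq_self_of_nodup xs h]

theorem pv_mem_diff_singleton (ws : List String) (x y : String) :
    y ∈ PySem.Set.diff ws [x] ↔ y ∈ ws ∧ y ≠ x := by
  rw [PySem.Set.mem_diff]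
  constructor
  · rintro ⟨h1, h2⟩; exact ⟨h1, by simpa using h2⟩
  · rintro ⟨h1, h2⟩; exact ⟨h1, by simpa using h2⟩

theorem pv_diff_singleton_length (ws : List String) (x : String) (hn : ws.Nodup) (hx : x ∈ ws) :
    (PySem.Set.diff ws [x]).length = ws.length - 1 := by
  have heq : PySem.Set.diff ws [x] = ws.erase x := by
    rw [List.Nodup.erase_eq_filter hn]
    apply List.filter_congr
    intro b _
    by_cases hbx : b = x
    · subst hbx; simp
    · simp [hbx]
  rw [heq, List.length_erase_of_mem hx]

theorem pvChunks_succ (s : String) (i wl : Int) (k : Nat) :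
    pvChunks s i wl (k + 1) =
      PySem.Str.slice s (some i) (some (i + wl)) :: pvChunks s (i + wl) wl k := by
  have hfun : (fun j : Nat => PySem.Str.slice s (some (i + ((j + 1 : Nat) : Int) * wl))
                  (some (i + ((j + 1 : Nat) : Int) * wl + wl)))
      = (fun j : Nat => PySem.Str.slice s (some (i + wl + (j : Int) * wl))
                  (some (i + wl + (j : Int) * wl + wl))) := by
    funext j
    have hj : i + ((j + 1 : Nat) : Int) * wl = i + wl + (j : Int) * wl := by push_cast; ring
    rw [hj]
  unfold pvChunks
  rw [List.range_succ_eq_map]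
  simp only [List.map_cons, List.map_map, Function.comp_def, Nat.succ_eq_add_one,
    Nat.cast_zero, zero_mul, add_zero]
  rw [hfun]

theorem pvBounds_succ (s : String) (i wl : Int) (k : Nat) :
    pvBounds s i wl (k + 1) = (decide (i < PySem.Str.len s) && pvBounds s (i + wl) wl k) := by
  have hfun : (fun j : Nat => decide (i + ((j + 1 : Nat) : Int) * wl < PySem.Str.len s))
      = (fun j : Nat => decide (i + wl + (j : Int) * wl < PySem.Str.len s)) := by
    funext j
    have hj : i + ((j + 1 : Nat) : Int) * wl = i + wl + (j : Int) * wl := by push_cast; ring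
    rw [hj]
  unfold pvBounds
  rw [List.range_succ_eq_map]
  simp only [List.all_cons, List.all_map, Function.comp_def, Nat.succ_eq_add_one,
    Nat.cast_zero, zero_mul, add_zero]
  rw [hfun]

theorem pv_alt_iff (s : String) (i wl : Int) (ws : List String) :
    descend_alt s i ws wl = true ↔ pvGood s i wl ws := by
  have hrange := PySem.List.pyRange_zero_natCast ws.length
  unfold descend_alt pvGood pvBounds pvChunks
  simp only [hrange, List.map_map, List.any_map, List.all_map, Function.comp_def]
  have hlen : ((List.range ws.length).map
      (fun (j : Nat) => PySem.Str.slice s (some (i + (j : Int) * wl)) (some (i + (j : Int) * wl + wl)))).length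
      = ws.length := by simp
  by_cases hb : ((List.range ws.length).all (fun (j : Nat) => decide (i + (j : Int) * wl < PySem.Str.len s))) = true
  · have hany : ((List.range ws.length).any (fun (j : Nat) => decide (i + (j : Int) * wl ≥ PySem.Str.len s))) = false := by
      rw [List.any_eq_false]
      intro j hj
      have := List.all_eq_true.mp hb j hj
      simp only [decide_eq_true_eq] at this ⊢
      omega
    have hiff := pv_ofList_length_eq_iff ((List.range ws.length).map
      (fun (j : Nat) => PySem.Str.slice s (some (i + (j : Int) * wl)) (some (i + (j : Int) * wl + wl))))
    rw [hlen] at hiff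
    simp only [hany, Bool.false_eq_true, if_false]
    rw [Bool.and_eq_true, decide_eq_true_eq, hiff]
    constructor
    · rintro ⟨h1, h2⟩
      refine ⟨hb, h1, ?_⟩
      intro c hc
      obtain ⟨j, hj, rfl⟩ := List.mem_map.mp hc
      exact (PySem.Set.contains_iff ws _).mp (List.all_eq_true.mp h2 j hj)
    · rintro ⟨-, h1, h2⟩
      refine ⟨h1, List.all_eq_true.mpr ?_⟩
      intro j hj
      exact (PySem.Set.contains_iff ws _).mpr (h2 _ (List.mem_map.mpr ⟨j, hj, rfl⟩))
  · have hany : ((List.range ws.length).any (fun (j : Nat) => decide (i + (j : Int) * wl ≥ PySem.Str.len s))) = true := by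
      rw [List.any_eq_true]
      rcases List.all_eq_false.mp (Bool.eq_false_iff.mpr hb) with ⟨j, hj, hjf⟩
      refine ⟨j, hj, ?_⟩
      simp only [decide_eq_true_eq] at hjf ⊢
      omega
    simp only [hany, if_true]
    constructor
    · intro h; exact absurd h (by simp)
    · rintro ⟨h1, -⟩; exact absurd h1 hb

theorem pv_descend_iff (s : String) (wl : Int) :
    ∀ (k : Nat) (ws : List String), ws.length = k → ws.Nodup → ∀ i : Int,
      (descend s i ws wl = true ↔ pvGood s i wl ws) := by
  intro k
  induction k with
  | zero =>
    intro ws hlen _ i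
    have hnil : ws = [] := List.length_eq_zero_iff.mp hlen
    subst hnil
    rw [descend]
    simp [pvGood, pvChunks, pvBounds]
  | succ k ih =>
    intro ws hlen hnodup i
    have hne : ws.length ≠ 0 := by omega
    rw [descend, if_neg hne]
    have hgood : pvGood s i wl ws ↔
        ((decide (i < PySem.Str.len s) && pvBounds s (i + wl) wl k) = true ∧
          (¬ PySem.Str.slice s (some i) (some (i + wl)) ∈ pvChunks s (i + wl) wl k ∧
            (pvChunks s (i + wl) wl k).Nodup) ∧
          (PySem.Str.slice s (some i) (some (i + wl)) ∈ ws ∧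
            ∀ c ∈ pvChunks s (i + wl) wl k, c ∈ ws)) := by
      unfold pvGood
      rw [hlen, pvBounds_succ, pvChunks_succ]
      simp only [List.nodup_cons, List.mem_cons, forall_eq_or_imp]
    by_cases hi : i ≥ PySem.Str.len s
    · rw [if_pos hi]
      constructor
      · intro h; exact absurd h (by simp)
      · intro hg
        rcases hgood.mp hg with ⟨hbnd, -, -⟩
        have hlt := ((Bool.and_eq_true _ _).mp hbnd).1
        rw [decide_eq_true_eq] at hlt
        exact absurd hlt (not_lt.mpr hi)
    · rw [if_neg hi]
      replace hi := lt_of_not_ge hi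
      set c0 := PySem.Str.slice s (some i) (some (i + wl)) with hc0
      by_cases hc : PySem.Set.contains ws c0 = true
      · rw [if_pos hc]
        have hc0mem : c0 ∈ ws := (PySem.Set.contains_iff ws c0).mp hc
        have hlen' : (PySem.Set.diff ws [c0]).length = k := by
          rw [pv_diff_singleton_length ws c0 hnodup hc0mem]; omega
        have hnodup' : (PySem.Set.diff ws [c0]).Nodup := PySem.Set.nodup_diff ws [c0] hnodup
        rw [ih (PySem.Set.diff ws [c0]) hlen' hnodup' (i + wl), hgood]
        have hgood' : pvGood s (i + wl) wl (PySem.Set.diff ws [c0]) ↔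
            (pvBounds s (i + wl) wl k = true ∧ (pvChunks s (i + wl) wl k).Nodup ∧
              ∀ c ∈ pvChunks s (i + wl) wl k, c ∈ PySem.Set.diff ws [c0]) := by
          unfold pvGood
          rw [hlen']
        rw [hgood']
        constructor
        · rintro ⟨hbnd, hnd, hmem⟩
          refine ⟨by simp only [Bool.and_eq_true, decide_eq_true_eq]; exact ⟨hi, hbnd⟩,
            ⟨?_, hnd⟩, hc0mem, ?_⟩
          · intro hin
            rcases (pv_mem_diff_singleton ws c0 c0).mp (hmem c0 hin) with ⟨-, hne'⟩
            exact hne' rfl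
          · intro c hcin
            exact ((pv_mem_diff_singleton ws c0 c).mp (hmem c hcin)).1
        · rintro ⟨hbnd, ⟨hnotin, hnd⟩, -, hmem⟩
          refine ⟨((Bool.and_eq_true _ _).mp hbnd).2, hnd, ?_⟩
          intro c hcin
          refine (pv_mem_diff_singleton ws c0 c).mpr ⟨hmem c hcin, ?_⟩
          intro hceq; exact hnotin (hceq ▸ hcin)
      · rw [if_neg hc]
        constructor
        · intro h; exact absurd h (by simp)
        · intro hg
          rcases hgood.mp hg with ⟨-, -, hc0mem, -⟩
          exact absurd ((PySem.Set.contains_iff ws c0).mpr hc0mem) hc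

-- ===== VERDICT (by name: the statement is the Claim_ definition above) =====
theorem descend_spec : Claim_equal_descend := by
  intro s i ws wl _ hpre
  unfold Spec_descend
  have h1 := pv_descend_iff s wl ws.length ws rfl hpre i
  have h2 := pv_alt_iff s i wl ws
  rcases Bool.eq_false_or_eq_true (descend s i ws wl) with h | h <;>
    rcases Bool.eq_false_or_eq_true (descend_alt s i ws wl) with h' | h' <;>
      simp_all
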